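-- pv_equiv track=rewrite | github.com/lanfordhugo/protocol-parse | src/field_parser.py | parsed_one_byte_data
-- ===== SOURCE A (Python) =====
-- from typing import List, Dict, Any, Tuple
--
-- def get_multi_bit_val(byte: int, start: int, bit_number: int) -> int:
--     """
--     获取多个bit位数据大小
--     """
--     return (byte >> start) & (0xFF >> (8 - bit_number))
--
-- def parsed_one_byte_data(
--     byte: int, bit_data_format: List[int], bit_key_format: List[str]
-- ) -> Dict[str, int]:
--     """
--     针对一个字节的报文，按bit处理的报文
--
--     参数:
--     byte: 待解析的字节数据
--     bit_data_format: 每个字段的位长度列表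
--     bit_key_format: 每个字段的键名列表
--
--     返回:
--     Dict[str, int]: 解析后的字典，��为字段名，值为对应的数据
--
--     功能:
--     1. 遍历bit_data_format列表，逐个解析字节中的位字段
--     2. 使用get_multi_bit_val函数提取指定位的值
--     3. 将解析结果存入字典，键名来自bit_key_format
--     """
--     bit_parsed_dict = {}
--     cur_bit_index = 0
--     for index, one_field_len in enumerate(bit_data_format):
--         # 从当前位置开始，提取指定长度的位值
--         data_ = get_multi_bit_val(byte, cur_bit_index, one_field_len)
--         # 将提取的值存入字典，使用对应的键名
--         bit_parsed_dict[bit_key_format[index]] = data_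
--         # 更新当前位索引
--         cur_bit_index += one_field_len
--     return bit_parsed_dict
-- ===== SOURCE B (Python) =====
-- def get_multi_bit_val(byte: int, start: int, bit_number: int) -> int:
--     return (byte >> start) & (0xFF >> (8 - bit_number))
--
--
-- def parsed_one_byte_data(byte, bit_data_format, bit_key_format):
--     # index-based dict comprehension; each field's start offset is the prefix
--     # sum of the widths before it, computed directly instead of by a running
--     # accumulator variable
--     return {
--         bit_key_format[i]: get_multi_bit_val(byte, sum(bit_data_format[:i]), bit_data_format[i])
--         for i in range(len(bit_data_format))
--     }
-- ===== Notes on version B (the rewrite author's own statement) =====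
-- stated objective: alternative
-- what changed: Replaces A's stateful loop (running cur_bit_index accumulator plus dict mutation) by an index-based dict comprehension whose start offsets are computed as closed-form prefix sums sum(bit_data_format[:i]).
import Mathlib
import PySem

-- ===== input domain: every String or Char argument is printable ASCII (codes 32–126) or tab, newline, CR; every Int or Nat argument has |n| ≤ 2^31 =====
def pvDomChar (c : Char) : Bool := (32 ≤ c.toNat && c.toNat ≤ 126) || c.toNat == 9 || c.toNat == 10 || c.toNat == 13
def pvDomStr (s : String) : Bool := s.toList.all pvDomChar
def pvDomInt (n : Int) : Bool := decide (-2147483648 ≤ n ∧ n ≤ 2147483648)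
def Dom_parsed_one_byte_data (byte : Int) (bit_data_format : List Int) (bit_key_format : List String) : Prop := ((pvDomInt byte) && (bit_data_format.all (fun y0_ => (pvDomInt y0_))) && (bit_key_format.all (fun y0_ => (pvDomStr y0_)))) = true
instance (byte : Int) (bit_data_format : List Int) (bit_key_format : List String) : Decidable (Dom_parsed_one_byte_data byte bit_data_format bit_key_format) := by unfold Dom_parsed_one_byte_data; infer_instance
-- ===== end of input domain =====

-- B replaces A's stateful loop (running bit-offset accumulator + mutated dict) by an
-- index-based dict comprehension whose start offsets are closed-form prefix sums;
-- objective: alternative decomposition (no claim of speed).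

-- ===== PORT A =====
-- shared module helper (both Pythons define it with this exact body)
def get_multi_bit_val (byte : Int) (start : Int) (bit_number : Int) : Int :=
  PySem.Int.band (byte >>> start) ((255 : Int) >>> (8 - bit_number))

def parsed_one_byte_data (byte : Int) (bit_data_format : List Int) (bit_key_format : List String) : List (String × Int) :=
  -- bit_parsed_dict = {}; cur_bit_index = 0; for index, one_field_len in enumerate(...)
  (((PySem.List.enumerate bit_data_format).foldl
      (fun (st : PySem.Dict String Int × Int) p =>
        let data_ := get_multi_bit_val byte st.2 p.2
        (st.1.insert ((PySem.List.pyGet? bit_key_format p.1).getD "") data_, st.2 + p.2))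
      (PySem.Dict.empty, 0)).1).items

-- ===== PORT B =====
def parsed_one_byte_data_alt (byte : Int) (bit_data_format : List Int) (bit_key_format : List String) : List (String × Int) :=
  -- {bit_key_format[i]: get_multi_bit_val(byte, sum(bit_data_format[:i]), bit_data_format[i]) for i in range(len(...))}
  ((PySem.List.pyRange 0 (bit_data_format.length : Int)).foldl
      (fun (d : PySem.Dict String Int) i =>
        d.insert ((PySem.List.pyGet? bit_key_format i).getD "")
          (get_multi_bit_val byte (PySem.List.slice bit_data_format none (some i)).sum
            ((PySem.List.pyGet? bit_data_format i).getD 0)))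
      PySem.Dict.empty).items

-- ===== PRECONDITION & SPEC =====
-- Pre_ excludes exactly the inputs where A raises: IndexError when bit_key_format is
-- shorter than bit_data_format, and ValueError from a negative shift count when some
-- width exceeds 8 or a running bit offset (prefix sum of widths) is negative.
def Pre_parsed_one_byte_data (byte : Int) (bit_data_format : List Int) (bit_key_format : List String) : Prop :=
  bit_data_format.length ≤ bit_key_format.length ∧ (∀ l ∈ bit_data_format, l ≤ 8) ∧
    ∀ i < bit_data_format.length, 0 ≤ (bit_data_format.take i).sum
instance (byte : Int) (bit_data_format : List Int) (bit_key_format : List String) : Decidable (Pre_parsed_one_byte_data byte bit_data_format bit_key_format) := by unfold Pre_parsed_one_byte_data; infer_instance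

def pvWitness_parsed_one_byte_data : Int × List Int × List String := (5, [2, 3], ["a", "b"])

def Spec_parsed_one_byte_data (byte : Int) (bit_data_format : List Int) (bit_key_format : List String) (out : List (String × Int)) : Prop := out = parsed_one_byte_data_alt byte bit_data_format bit_key_format
instance (byte : Int) (bit_data_format : List Int) (bit_key_format : List String) (out : List (String × Int)) : Decidable (Spec_parsed_one_byte_data byte bit_data_format bit_key_format out) := by unfold Spec_parsed_one_byte_data; infer_instance

-- ===== CLAIM (what is proved, stated in full; the proofs are below) =====
def Claim_equal_parsed_one_byte_data : Prop := ∀ (byte : Int) (bit_data_format : List Int) (bit_key_format : List String), Dom_parsed_one_byte_data byte bit_data_format bit_key_format → Pre_parsed_one_byte_data byte bit_data_format bit_key_format → Spec_parsed_one_byte_data byte bit_data_format bit_key_format (parsed_one_byte_data byte bit_data_format bit_key_format)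

-- ===== LEMMAS AND PROOFS =====

-- the sequence of (key, value) insertions both loops perform, as one list
def pvPairs (byte : Int) (keys : List String) : List Int → Int → Int → List (String × Int)
  | [], _, _ => []
  | l :: ls, k, cur =>
    ((PySem.List.pyGet? keys k).getD "", get_multi_bit_val byte cur l) :: pvPairs byte keys ls (k + 1) (cur + l)

theorem pv_foldA (byte : Int) (keys : List String) :
    ∀ (fmt : List Int) (k cur : Int) (d : PySem.Dict String Int),
      ((PySem.List.enumerate fmt k).foldl
        (fun (st : PySem.Dict String Int × Int) p =>
          let data_ := get_multi_bit_val byte st.2 p.2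
          (st.1.insert ((PySem.List.pyGet? keys p.1).getD "") data_, st.2 + p.2))
        (d, cur)).1
      = (pvPairs byte keys fmt k cur).foldl (fun d p => d.insert p.1 p.2) d := by
  intro fmt
  induction fmt with
  | nil => intro k cur d; simp [PySem.List.enumerate, pvPairs]
  | cons l ls ih =>
    intro k cur d
    simp only [PySem.List.enumerate, pvPairs, List.foldl_cons]
    exact ih (k + 1) (cur + l) _

theorem pv_mapB (byte : Int) (keys : List String) (fmt : List Int) :
    ∀ (k : Nat),
      (PySem.List.pyRange (k : Int) (fmt.length : Int)).map
        (fun i => ((PySem.List.pyGet? keys i).getD "",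
          get_multi_bit_val byte (PySem.List.slice fmt none (some i)).sum
            ((PySem.List.pyGet? fmt i).getD 0)))
      = pvPairs byte keys (fmt.drop k) (k : Int) ((fmt.take k).sum) := by
  intro k
  induction hfuel : fmt.length - k generalizing k with
  | zero =>
    have hk : fmt.length ≤ k := by omega
    rw [PySem.List.pyRange_one_eq_nil (by exact_mod_cast hk),
      List.drop_eq_nil_of_le hk]
    simp [pvPairs]
  | succ n ih =>
    have hk : k < fmt.length := by omega
    rw [PySem.List.pyRange_one_cons (by exact_mod_cast hk), List.map_cons,
      List.drop_eq_getElem_cons hk]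
    simp only [pvPairs]
    congr 1
    · rw [PySem.List.slice_to _ (Int.natCast_nonneg k)]
      simp [List.getElem?_eq_getElem hk]
    · have := ih (k + 1) (by omega)
      rw [List.sum_take_succ fmt k hk] at this
      simpa using this

-- ===== VERDICT (by name: the statement is the Claim_ definition above) =====
theorem parsed_one_byte_data_spec : Claim_equal_parsed_one_byte_data := by
  intro byte fmt keys _ _
  unfold Spec_parsed_one_byte_data parsed_one_byte_data parsed_one_byte_data_alt
  rw [pv_foldA byte keys fmt 0 0 PySem.Dict.empty]
  have h := pv_mapB byte keys fmt 0
  simp only [Nat.cast_zero, List.drop_zero, List.take_zero, List.sum_nil] at h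
  rw [← h, List.foldl_map]
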